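-- pv_equiv track=rewrite | github.com/mgopi1990/George3Hacker | diff_min_unordered_list.py | diff_min_list
-- ===== SOURCE A (Python) =====
-- def diff_min_list(num_list):
-- 	if len(num_list) < 2:
-- 		return 0
--
-- 	if (num_list[0] < num_list[1]):
-- 		min1,min2 = num_list[0], num_list[1]
-- 	else:
-- 		min1,min2 = num_list[1], num_list[0]
--
-- 	for num in num_list[2:]:
-- 		if (num < min1):
-- 			min2,min1 = min1,num
-- 		elif (num < min2):
-- 			min2 = num
--
-- 	#print ("{} {}".format(min1, min2))
-- 	return (min2-min1)
-- ===== SOURCE B (Python) =====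
-- def diff_min_list(num_list):
--     if len(num_list) < 2:
--         return 0
--     s = sorted(num_list)
--     return s[1] - s[0]
-- ===== Notes on version B (the rewrite author's own statement) =====
-- stated objective: simpler
-- what changed: Replaces A's single-pass two-minimum tracking loop (running min1/min2 with swap logic) by sorting a copy of the list and subtracting its first two elements.
import Mathlib
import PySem

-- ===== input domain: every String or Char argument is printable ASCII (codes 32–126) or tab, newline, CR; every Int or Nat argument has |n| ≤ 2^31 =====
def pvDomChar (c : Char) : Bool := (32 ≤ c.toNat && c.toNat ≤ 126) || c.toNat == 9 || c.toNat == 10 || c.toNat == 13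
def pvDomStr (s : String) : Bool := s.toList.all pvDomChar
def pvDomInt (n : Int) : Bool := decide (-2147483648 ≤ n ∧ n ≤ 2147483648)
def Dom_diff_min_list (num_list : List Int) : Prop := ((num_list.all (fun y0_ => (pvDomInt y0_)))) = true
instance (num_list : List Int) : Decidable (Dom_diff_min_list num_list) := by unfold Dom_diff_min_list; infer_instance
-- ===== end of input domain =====

-- B replaces A's single-pass two-minimum tracking loop by sorting a copy and subtracting
-- the first two elements of the sorted list (objective: simpler; no mutation in either version).

-- ===== PORT A =====
-- A's loop body: update the running pair (min1, min2) with one element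
def pvStepA (p : Int × Int) (num : Int) : Int × Int :=
  if num < p.1 then (num, p.1) else if num < p.2 then (p.1, num) else p

def diff_min_list (num_list : List Int) : Int :=
  if num_list.length < 2 then 0
  else
    let init : Int × Int :=
      if PySem.List.pyGetD num_list 0 0 < PySem.List.pyGetD num_list 1 0 then
        (PySem.List.pyGetD num_list 0 0, PySem.List.pyGetD num_list 1 0)
      else
        (PySem.List.pyGetD num_list 1 0, PySem.List.pyGetD num_list 0 0)
    let p := (PySem.List.slice num_list (some 2) none).foldl pvStepA init
    p.2 - p.1

-- ===== PORT B =====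
def diff_min_list_alt (num_list : List Int) : Int :=
  if num_list.length < 2 then 0
  else
    let s := PySem.List.sorted num_list (fun x => x)
    PySem.List.pyGetD s 1 0 - PySem.List.pyGetD s 0 0

-- ===== PRECONDITION & SPEC =====
def Spec_diff_min_list (num_list : List Int) (out : Int) : Prop := out = diff_min_list_alt num_list
instance (num_list : List Int) (out : Int) : Decidable (Spec_diff_min_list num_list out) := by unfold Spec_diff_min_list; infer_instance

-- ===== CLAIM (what is proved, stated in full; the proofs are below) =====
def Claim_equal_diff_min_list : Prop := ∀ (num_list : List Int), Dom_diff_min_list num_list → Spec_diff_min_list num_list (diff_min_list num_list)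

-- ===== LEMMAS AND PROOFS =====

-- sorted (u ++ [c]) is c inserted into sorted u (insertion-sort unrolled one step)
lemma sorted_append_singleton (u : List Int) (c : Int) :
    PySem.List.sorted (u ++ [c]) (fun x => x) =
      PySem.List.insertBy (fun a b => decide (a < b)) c (PySem.List.sorted u (fun x => x)) := by
  rw [PySem.List.sorted_eq_foldl_insertBy, PySem.List.sorted_eq_foldl_insertBy]
  simp [List.foldl_append]

-- Invariant of A's loop: the pair stays ordered, its second component never grows,
-- and the pair is exactly the first two elements of the sorted whole input.
lemma loopA_sorted : ∀ (t : List Int) (m1 m2 : Int), m1 ≤ m2 →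
    (t.foldl pvStepA (m1, m2)).1 ≤ (t.foldl pvStepA (m1, m2)).2 ∧
    (t.foldl pvStepA (m1, m2)).2 ≤ m2 ∧
    ∃ r, PySem.List.sorted (m1 :: m2 :: t) (fun x => x) =
         (t.foldl pvStepA (m1, m2)).1 :: (t.foldl pvStepA (m1, m2)).2 :: r := by
  intro t
  induction t with
  | nil =>
    intro m1 m2 h
    refine ⟨h, le_refl _, [], ?_⟩
    rw [PySem.List.sorted_eq_self_of_pairwise _ _ (by simp [h])]; rfl
  | cons x t ih =>
    intro m1 m2 h
    -- one loop step: the new pair (a, b) keeps the two smallest of {m1, m2, x},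
    -- the dropped element c is ≥ b; then apply the IH from state (a, b).
    have key : ∀ a b c : Int, a ≤ b → b ≤ c → b ≤ m2 →
        (m1 :: m2 :: x :: t).Perm (c :: a :: b :: t) →
        pvStepA (m1, m2) x = (a, b) →
        (List.foldl pvStepA (pvStepA (m1, m2) x) t).1 ≤
          (List.foldl pvStepA (pvStepA (m1, m2) x) t).2 ∧
        (List.foldl pvStepA (pvStepA (m1, m2) x) t).2 ≤ m2 ∧
        ∃ r, PySem.List.sorted (m1 :: m2 :: x :: t) (fun y => y) =
             (List.foldl pvStepA (pvStepA (m1, m2) x) t).1 ::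
             (List.foldl pvStepA (pvStepA (m1, m2) x) t).2 :: r := by
      intro a b c hab hbc hbm2 hperm hstep
      rw [hstep]
      obtain ⟨h1, h2, r, hr⟩ := ih a b hab
      refine ⟨h1, le_trans h2 hbm2, ?_⟩
      have hperm' : (m1 :: m2 :: x :: t).Perm ((a :: b :: t) ++ [c]) :=
        hperm.trans (List.perm_append_singleton c (a :: b :: t)).symm
      rw [PySem.List.sorted_eq_sorted_of_perm _ _ (fun y => y) (fun _ _ hxy => hxy) hperm',
        sorted_append_singleton, hr]
      -- the first two sorted elements are ≤ b ≤ c, so inserting c leaves them in place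
      have hA : ¬ c < (List.foldl pvStepA (a, b) t).1 := by omega
      have hB : ¬ c < (List.foldl pvStepA (a, b) t).2 := by omega
      exact ⟨PySem.List.insertBy (fun a b => decide (a < b)) c r,
        by simp [PySem.List.insertBy, hA, hB]⟩
    by_cases hx1 : x < m1
    · exact key x m1 m2 (le_of_lt hx1) h h
        ((List.Perm.swap m2 m1 (x :: t)).trans ((List.Perm.swap x m1 t).cons m2))
        (by simp [pvStepA, hx1])
    · by_cases hx2 : x < m2
      · exact key m1 x m2 (by omega) (le_of_lt hx2) (le_of_lt hx2)
          (List.Perm.swap m2 m1 (x :: t))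
          (by simp [pvStepA, hx1, hx2])
      · exact key m1 m2 x h (by omega) (le_refl m2)
          (((List.Perm.swap x m2 t).cons m1).trans (List.Perm.swap x m1 (m2 :: t)))
          (by simp [pvStepA, hx1, hx2])

-- ===== VERDICT (by name: the statement is the Claim_ definition above) =====
theorem diff_min_list_spec : Claim_equal_diff_min_list := by
  intro num_list _
  unfold Spec_diff_min_list diff_min_list diff_min_list_alt
  match num_list with
  | [] => rfl
  | [a] => rfl
  | a :: b :: t =>
    have h0 : PySem.List.pyGetD (a :: b :: t) 0 0 = a := by simp [pysem]
    have h1 : PySem.List.pyGetD (a :: b :: t) 1 0 = b := by simp [pysem]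
    have hsl : PySem.List.slice (a :: b :: t) (some 2) none = t := by
      rw [PySem.List.slice_from _ (by omega)]; rfl
    simp only [h0, h1, hsl, List.length_cons]
    rw [if_neg (show ¬ t.length + 1 + 1 < 2 by omega)]
    by_cases hab : a < b
    · obtain ⟨_, _, r, hr⟩ := loopA_sorted t a b (le_of_lt hab)
      rw [if_pos hab, hr]
      simp [pysem]
    · obtain ⟨_, _, r, hr⟩ := loopA_sorted t b a (by omega)
      rw [if_neg hab,
        PySem.List.sorted_eq_sorted_of_perm (a :: b :: t) (b :: a :: t) (fun y => y)
          (fun _ _ hxy => hxy) (List.Perm.swap b a t), hr]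
      simp [pysem]
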